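-- pv_equiv track=rewrite | github.com/metraton/gaia-ops | dist/gaia-ops/hooks/modules/tools/stage_decomposer.py | _tokenize_args
-- ===== SOURCE A (Python) =====
-- from typing import List, Optional
--
-- def _tokenize_args(command_text: str) -> List[str]:
--     """
--     Split *command_text* into tokens (command + args).
--
--     Uses a simple quote-aware tokeniser -- does NOT invoke shlex so we
--     stay dependency-free and avoid locale issues.
--
--     Returns a list where element 0 is the executable and the remainder
--     are arguments.
--     """
--     tokens: List[str] = []
--     current: List[str] = []
--     i = 0
--     n = len(command_text)
--     in_single = False
--     in_double = False
--
--     while i < n: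
--         ch = command_text[i]
--
--         if ch == "\\" and not in_single and i + 1 < n:
--             current.append(command_text[i + 1])
--             i += 2
--             continue
--
--         if ch == "'" and not in_double:
--             in_single = not in_single
--             i += 1
--             continue
--
--         if ch == '"' and not in_single:
--             in_double = not in_double
--             i += 1
--             continue
--
--         if not in_single and not in_double and ch in (" ", "\t"):
--             if current:
--                 tokens.append("".join(current))
--                 current = []
--             i += 1
--             continue
--
--         current.append(ch)
--         i += 1
--
--     if current:
--         tokens.append("".join(current))
--
--     return tokens
-- ===== SOURCE B (Python) =====
-- from typing import List
--
-- def _tokenize_args(command_text: str) -> List[str]: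
--     """Quote-aware tokeniser: outer loop over positions, with dedicated
--     inner loops consuming single- and double-quoted segments."""
--     tokens: List[str] = []
--     current: List[str] = []
--     i = 0
--     n = len(command_text)
--     while i < n:
--         ch = command_text[i]
--         if ch in (" ", "\t"):
--             if current:
--                 tokens.append("".join(current))
--                 current = []
--             i += 1
--         elif ch == "'":
--             i += 1
--             while i < n and command_text[i] != "'":
--                 current.append(command_text[i])
--                 i += 1
--             if i < n:
--                 i += 1  # skip closing quote
--         elif ch == '"':
--             i += 1
--             while i < n:
--                 c = command_text[i]
--                 if c == '"':
--                     i += 1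
--                     break
--                 if c == "\\" and i + 1 < n:
--                     current.append(command_text[i + 1])
--                     i += 2
--                 else:
--                     current.append(c)
--                     i += 1
--         elif ch == "\\":
--             if i + 1 < n:
--                 current.append(command_text[i + 1])
--                 i += 2
--             else:
--                 current.append(ch)
--                 i += 1
--         else:
--             current.append(ch)
--             i += 1
--     if current:
--         tokens.append("".join(current))
--     return tokens
-- ===== Notes on version B (the rewrite author's own statement) =====
-- stated objective: alternative
-- what changed: Replaces the single flag-driven state machine (in_single/in_double booleans tested on every character) by an outer loop with dedicated inner loops that consume a whole single-quoted segment (verbatim) or double-quoted segment (with backslash escapes) at once.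
import Mathlib
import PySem

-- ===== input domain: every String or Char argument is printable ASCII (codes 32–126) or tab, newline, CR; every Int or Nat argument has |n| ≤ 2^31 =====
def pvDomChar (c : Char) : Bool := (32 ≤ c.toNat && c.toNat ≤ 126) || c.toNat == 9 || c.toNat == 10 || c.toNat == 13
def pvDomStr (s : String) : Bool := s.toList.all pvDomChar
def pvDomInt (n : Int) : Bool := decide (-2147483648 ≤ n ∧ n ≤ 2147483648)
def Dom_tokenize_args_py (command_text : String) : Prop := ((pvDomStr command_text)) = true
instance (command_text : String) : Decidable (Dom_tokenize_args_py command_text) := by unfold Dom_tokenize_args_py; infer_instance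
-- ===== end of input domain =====

-- B replaces A's flag-driven scanner by an outer loop with inner loops that consume each
-- quoted segment at once; same tokens, same cost (objective: alternative).

-- ===== PORT A =====
-- A's while-loop: state = (remaining chars, current, tokens, in_single, in_double).
def tokenizeA : List Char → List Char → List String → Bool → Bool → List String
  | [], cur, toks, _, _ => if cur ≠ [] then toks ++ [String.ofList cur] else toks
  | ch :: rest, cur, toks, s, d =>
    if ch = '\\' ∧ s = false ∧ rest ≠ [] then
      tokenizeA (rest.drop 1) (cur ++ rest.take 1) toks s d
    else if ch = '\'' ∧ d = false then
      tokenizeA rest cur toks (!s) d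
    else if ch = '"' ∧ s = false then
      tokenizeA rest cur toks s (!d)
    else if s = false ∧ d = false ∧ (ch = ' ' ∨ ch = '\t') then
      tokenizeA rest [] (if cur ≠ [] then toks ++ [String.ofList cur] else toks) s d
    else
      tokenizeA rest (cur ++ [ch]) toks s d
  termination_by cs _ _ _ _ => cs.length
  decreasing_by all_goals (simp; try omega)

def tokenize_args_py (command_text : String) : List String :=
  tokenizeA command_text.toList [] [] false false

-- ===== PORT B =====
-- inner loop for a single-quoted segment: copy verbatim until closing quote / end
def scanSingle : List Char → List Char → List Char × List Char
  | [], cur => (cur, [])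
  | c :: rest, cur => if c = '\'' then (cur, rest) else scanSingle rest (cur ++ [c])

-- inner loop for a double-quoted segment: backslash escapes the next char
def scanDouble : List Char → List Char → List Char × List Char
  | [], cur => (cur, [])
  | c :: rest, cur =>
    if c = '"' then (cur, rest)
    else if c = '\\' ∧ rest ≠ [] then scanDouble (rest.drop 1) (cur ++ rest.take 1)
    else scanDouble rest (cur ++ [c])
  termination_by cs _ => cs.length
  decreasing_by all_goals (simp; try omega)

theorem scanSingle_len (cs cur) : (scanSingle cs cur).2.length ≤ cs.length := by
  induction cs generalizing cur with
  | nil => simp [scanSingle]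
  | cons c rest ih =>
    simp only [scanSingle]
    split
    · simp
    · exact le_trans (ih _) (Nat.le_succ _)

theorem scanDouble_len : ∀ (n : Nat) (cs : List Char), cs.length ≤ n → ∀ cur,
    (scanDouble cs cur).2.length ≤ cs.length := by
  intro n
  induction n with
  | zero => intro cs h cur; rw [List.length_eq_zero_iff.mp (Nat.le_zero.mp h)]; simp [scanDouble]
  | succ n ih =>
    intro cs h cur
    match cs with
    | [] => simp [scanDouble]
    | c :: rest =>
      rw [scanDouble]
      split_ifs with h1 h2
      · simp
      · refine le_trans (ih _ ?_ _) ?_ <;> (simp at h ⊢; try omega)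
      · refine le_trans (ih _ ?_ _) ?_ <;> (simp at h ⊢; try omega)

-- outer loop of B
def tokenizeB : List Char → List Char → List String → List String
  | [], cur, toks => if cur ≠ [] then toks ++ [String.ofList cur] else toks
  | ch :: rest, cur, toks =>
    if ch = ' ' ∨ ch = '\t' then
      tokenizeB rest [] (if cur ≠ [] then toks ++ [String.ofList cur] else toks)
    else if ch = '\'' then
      tokenizeB (scanSingle rest cur).2 (scanSingle rest cur).1 toks
    else if ch = '"' then
      tokenizeB (scanDouble rest cur).2 (scanDouble rest cur).1 toks
    else if ch = '\\' then
      match rest with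
      | c2 :: rest2 => tokenizeB rest2 (cur ++ [c2]) toks
      | [] => tokenizeB [] (cur ++ [ch]) toks
    else
      tokenizeB rest (cur ++ [ch]) toks
  termination_by cs _ _ => cs.length
  decreasing_by all_goals first
    | exact Nat.lt_succ_of_le (scanSingle_len _ _)
    | exact Nat.lt_succ_of_le (scanDouble_len _ _ (le_refl _) _)
    | (simp; try omega)

def tokenize_args_py_alt (command_text : String) : List String :=
  tokenizeB command_text.toList [] []

-- ===== PRECONDITION & SPEC =====
def Spec_tokenize_args_py (command_text : String) (out : List String) : Prop := out = tokenize_args_py_alt command_text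
instance (command_text : String) (out : List String) : Decidable (Spec_tokenize_args_py command_text out) := by unfold Spec_tokenize_args_py; infer_instance

-- ===== CLAIM (what is proved, stated in full; the proofs are below) =====
def Claim_equal_tokenize_args_py : Prop := ∀ (command_text : String), Dom_tokenize_args_py command_text → Spec_tokenize_args_py command_text (tokenize_args_py command_text)

-- ===== LEMMAS AND PROOFS =====

-- Inside single quotes (in_double = false), A behaves like B's scanSingle inner loop.
theorem tokenizeA_single (cs : List Char) : ∀ cur toks,
    tokenizeA cs cur toks true false =
      tokenizeA (scanSingle cs cur).2 (scanSingle cs cur).1 toks false false := by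
  induction cs with
  | nil => intro cur toks; simp [scanSingle, tokenizeA]
  | cons c rest ih =>
    intro cur toks
    by_cases hc : c = '\''
    · subst hc; rw [tokenizeA]; simp [scanSingle]
    · rw [tokenizeA, scanSingle]
      simp [hc, ih]

-- Inside double quotes (in_single = false), A behaves like B's scanDouble inner loop.
theorem tokenizeA_double : ∀ n (cs : List Char), cs.length ≤ n → ∀ cur toks,
    tokenizeA cs cur toks false true =
      tokenizeA (scanDouble cs cur).2 (scanDouble cs cur).1 toks false false := by
  intro n
  induction n with
  | zero =>
    intro cs h cur toks
    rw [List.length_eq_zero_iff.mp (Nat.le_zero.mp h)]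
    simp [scanDouble, tokenizeA]
  | succ n ih =>
    intro cs h cur toks
    match cs with
    | [] => simp [scanDouble, tokenizeA]
    | c :: rest =>
      simp only [List.length_cons, Nat.add_le_add_iff_right] at h
      by_cases hq : c = '"'
      · subst hq; rw [tokenizeA]; simp [scanDouble]
      · by_cases hbs : c = '\\'
        · subst hbs
          match rest with
          | [] => rw [tokenizeA]; simp [scanDouble, tokenizeA]
          | c2 :: rest2 =>
            rw [tokenizeA, scanDouble]
            simp only [List.length_cons] at h
            simp
            exact ih _ (by omega) _ _
        · rw [tokenizeA, scanDouble]
          simp [hq, hbs, ih _ h]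

theorem tokenizeA_eq_B : ∀ n (cs : List Char), cs.length ≤ n → ∀ cur toks,
    tokenizeA cs cur toks false false = tokenizeB cs cur toks := by
  intro n
  induction n with
  | zero =>
    intro cs h cur toks
    rw [List.length_eq_zero_iff.mp (Nat.le_zero.mp h)]
    simp [tokenizeA, tokenizeB]
  | succ n ih =>
    intro cs h cur toks
    match cs with
    | [] => simp [tokenizeA, tokenizeB]
    | c :: rest =>
      simp only [List.length_cons, Nat.add_le_add_iff_right] at h
      by_cases hq : c = '\''
      · subst hq
        rw [tokenizeA, tokenizeB.eq_def]
        simp only [Char.reduceEq, and_false, and_true, false_and, or_self, if_true,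
          and_self, if_neg, not_false_eq_true, Bool.not_false]
        rw [tokenizeA_single]
        exact ih _ (le_trans (scanSingle_len rest cur) h) _ _
      · by_cases hd : c = '"'
        · subst hd
          rw [tokenizeA, tokenizeB.eq_def]
          simp only [Char.reduceEq, and_false, and_true, false_and, or_self, if_true,
            and_self, if_neg, not_false_eq_true, Bool.not_false]
          rw [tokenizeA_double rest.length rest (le_refl _)]
          exact ih _ (le_trans (scanDouble_len rest.length rest (le_refl _) cur) h) _ _
        · by_cases hbs : c = '\\'
          · subst hbs
            match rest with
            | [] => rw [tokenizeA, tokenizeB.eq_def]; simp [tokenizeA, tokenizeB]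
            | c2 :: rest2 =>
              rw [tokenizeA, tokenizeB.eq_def]
              simp only [List.length_cons] at h
              simp [ih _ (by omega : rest2.length ≤ n)]
          · rw [tokenizeA, tokenizeB.eq_def]
            by_cases hsp : c = ' ' ∨ c = '\t'
            · rcases hsp with h2 | h2 <;> subst h2 <;> simp [ih _ h]
            · obtain ⟨hs1, hs2⟩ := not_or.mp hsp
              simp [hq, hd, hbs, hs1, hs2, ih _ h]

-- ===== VERDICT (by name: the statement is the Claim_ definition above) =====
theorem tokenize_args_py_spec : Claim_equal_tokenize_args_py := by
  intro s _
  unfold Spec_tokenize_args_py tokenize_args_py tokenize_args_py_alt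
  exact tokenizeA_eq_B s.toList.length s.toList (le_refl _) [] []
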